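-- pv_equiv track=rewrite | github.com/nicolasdickenmann/builddatsetadvanced | network-design-main/topologies/topogen/ExtendedGeneralizedFatTreeGenerator.py | _get_Vh
-- ===== SOURCE A (Python) =====
-- from functools import reduce
--
-- def _get_array_product(array):
--     if len(array) == 0:
--         return 1
--     else:
--         return reduce(lambda x, y: x * y, array)
--
-- def _get_lambda(m, w, lvl, h):
--     _lambda = _get_array_product(w[1:lvl + 1])
--     _lambda *= _get_array_product(m[lvl + 1:h + 1])
--
--     return _lambda
--
-- def _get_Vjh(j, h, m, w):
--     Vjh = []
--
--     for lvl in range(0, h + 1):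
--         lam = _get_lambda(m, w, lvl, h)
--         for a in range(j * lam, (j + 1) * lam):
--             Vjh.append([lvl, a])
--
--     return Vjh
--
-- def _get_Vh(hp1, m, w):
--     if not isinstance(hp1, int) or not isinstance(
--             m, list) or not isinstance(w, list):
--         exit('ERR: invalid function parameter type(s)')
--
--     if hp1 == 0:
--         return [[0, 0]]
--
--     # first part
--     Vjh = []
--     h = hp1 - 1
--     for j in range(0, m[hp1]):
--         Vjh.extend(_get_Vjh(j, h, m, w))
--     # second part
--     Vh = []
--     for a in range(0, _get_array_product(w[1:hp1 + 1])):
--         Vh.append([hp1, a])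
--     # add two sets and return
--     Vjh.extend(Vh)
--     Vjh.sort()
--
--     return Vjh
-- ===== SOURCE B (Python) =====
-- def _prod(xs):
--     p = 1
--     for x in xs:
--         p *= x
--     return p
--
--
-- def _get_Vh(hp1, m, w):
--     # Level-major emission: within level lvl, subtree j's node indices are the
--     # contiguous block [j*lam, (j+1)*lam), and levels are emitted in increasing
--     # order, so the list is born sorted and needs no final sort.
--     if hp1 == 0:
--         return [[0, 0]]
--     out = []
--     for lvl in range(hp1):
--         lam = _prod(w[1:lvl + 1]) * _prod(m[lvl + 1:hp1])
--         out.extend([lvl, a] for j in range(m[hp1]) for a in range(j * lam, (j + 1) * lam))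
--     out.extend([hp1, a] for a in range(_prod(w[1:hp1 + 1])))
--     return out
-- ===== Notes on version B (the rewrite author's own statement) =====
-- stated objective: alternative
-- what changed: B emits the [level,index] pairs directly in level-major order (loop nesting swapped: level outer, subtree j inner), exploiting that each subtree's per-level index block [j*lam,(j+1)*lam) is contiguous, so the output is born sorted and the final sort is removed.
import Mathlib
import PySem

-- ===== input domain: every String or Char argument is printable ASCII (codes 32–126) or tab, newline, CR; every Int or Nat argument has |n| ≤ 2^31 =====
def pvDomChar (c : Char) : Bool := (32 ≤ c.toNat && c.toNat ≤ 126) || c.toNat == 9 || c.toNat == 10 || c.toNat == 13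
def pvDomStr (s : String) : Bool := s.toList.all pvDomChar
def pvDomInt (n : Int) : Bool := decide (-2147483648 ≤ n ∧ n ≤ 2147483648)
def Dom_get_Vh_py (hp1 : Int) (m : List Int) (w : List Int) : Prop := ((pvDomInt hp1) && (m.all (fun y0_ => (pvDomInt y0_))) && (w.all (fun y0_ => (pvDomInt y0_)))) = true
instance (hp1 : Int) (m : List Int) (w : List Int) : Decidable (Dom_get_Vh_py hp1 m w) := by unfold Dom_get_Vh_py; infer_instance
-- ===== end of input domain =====

-- B emits the [level,index] pairs directly in level-major order (loop nesting swapped: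
-- level outer, subtree inner); each subtree's per-level index block is contiguous, so the
-- output is born sorted and the final sort is removed (alternative algorithm, same output).

-- ===== PORT A =====
def pvProdA : List Int → Int
  | [] => 1
  | x :: xs => xs.foldl (· * ·) x

def pvLambdaA (m w : List Int) (lvl h : Int) : Int :=
  (pvProdA (PySem.List.slice w (some 1) (some (lvl + 1)))) *
    (pvProdA (PySem.List.slice m (some (lvl + 1)) (some (h + 1))))

def pvVjhA (j h : Int) (m w : List Int) : List (List Int) :=
  (PySem.List.pyRange 0 (h + 1)).foldl (fun acc lvl =>
    let lam := pvLambdaA m w lvl h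
    (PySem.List.pyRange (j * lam) ((j + 1) * lam)).foldl
      (fun acc2 a => acc2 ++ [[lvl, a]]) acc) []

def get_Vh_py (hp1 : Int) (m : List Int) (w : List Int) : List (List Int) :=
  if hp1 = 0 then [[0, 0]]
  else
    match PySem.List.pyGet? m hp1 with
    | none => []  -- IndexError in Python; excluded by Pre_get_Vh_py
    | some mh =>
      let h := hp1 - 1
      let Vjh := (PySem.List.pyRange 0 mh).foldl (fun acc j => acc ++ pvVjhA j h m w) []
      let Vh := (PySem.List.pyRange 0 (pvProdA (PySem.List.slice w (some 1) (some (hp1 + 1))))).foldl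
          (fun acc a => acc ++ [[hp1, a]]) []
      PySem.List.sorted (Vjh ++ Vh) (fun x => x) false

-- ===== PORT B =====
def pvProdB (xs : List Int) : Int := xs.foldl (· * ·) 1

def get_Vh_py_alt (hp1 : Int) (m : List Int) (w : List Int) : List (List Int) :=
  if hp1 = 0 then [[0, 0]]
  else
    match PySem.List.pyGet? m hp1 with
    | none => []  -- IndexError in Python; excluded by Pre_get_Vh_py
    | some nTop =>
      let levels := (PySem.List.pyRange 0 hp1).foldl (fun acc lvl =>
        acc ++ (PySem.List.pyRange 0 nTop).flatMap (fun j =>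
          (PySem.List.pyRange
              (j * (pvProdB (PySem.List.slice w (some 1) (some (lvl + 1))) *
                    pvProdB (PySem.List.slice m (some (lvl + 1)) (some hp1))))
              ((j + 1) * (pvProdB (PySem.List.slice w (some 1) (some (lvl + 1))) *
                    pvProdB (PySem.List.slice m (some (lvl + 1)) (some hp1))))).map
            (fun a => [lvl, a]))) []
      levels ++ (PySem.List.pyRange 0 (pvProdB (PySem.List.slice w (some 1) (some (hp1 + 1))))).map
          (fun a => [hp1, a])

-- ===== PRECONDITION & SPEC =====
-- Pre_ excludes exactly the inputs on which Python A raises IndexError at m[hp1]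
-- (reached whenever hp1 ≠ 0 and hp1 is out of range for m, counting negative wraparound).
def Pre_get_Vh_py (hp1 : Int) (m : List Int) (w : List Int) : Prop :=
  hp1 = 0 ∨ PySem.Raise.InRange m.length hp1
instance (hp1 : Int) (m : List Int) (w : List Int) : Decidable (Pre_get_Vh_py hp1 m w) := by
  unfold Pre_get_Vh_py; infer_instance

def pvWitness_get_Vh_py : Int × List Int × List Int := (1, [0, 2], [0, 2])

def Spec_get_Vh_py (hp1 : Int) (m : List Int) (w : List Int) (out : List (List Int)) : Prop := out = get_Vh_py_alt hp1 m w
instance (hp1 : Int) (m : List Int) (w : List Int) (out : List (List Int)) : Decidable (Spec_get_Vh_py hp1 m w out) := by unfold Spec_get_Vh_py; infer_instance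

-- ===== CLAIM (what is proved, stated in full; the proofs are below) =====
def Claim_equal_get_Vh_py : Prop := ∀ (hp1 : Int) (m : List Int) (w : List Int), Dom_get_Vh_py hp1 m w → Pre_get_Vh_py hp1 m w → Spec_get_Vh_py hp1 m w (get_Vh_py hp1 m w)

-- ===== LEMMAS AND PROOFS =====

lemma prodA_eq_prodB (xs : List Int) : pvProdA xs = pvProdB xs := by
  cases xs with
  | nil => rfl
  | cons x t =>
    show t.foldl (· * ·) x = (x :: t).foldl (· * ·) 1
    simp only [List.foldl_cons, one_mul]

-- a nonpositive lam kills the j-th range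
lemma pyRange_mul_nil {lam : Int} (j : Int) (h : lam ≤ 0) :
    PySem.List.pyRange (j * lam) ((j + 1) * lam) = [] := by
  apply PySem.List.pyRange_one_eq_nil
  nlinarith

-- merging contiguous ranges: ⋃_{j<n} [j·lam, (j+1)·lam) = [0, n·lam)
lemma merge_ranges (lam : Int) (hl : 0 < lam) : ∀ (n : Nat),
    (PySem.List.pyRange 0 (n : Int)).flatMap
        (fun j => PySem.List.pyRange (j * lam) ((j + 1) * lam))
      = PySem.List.pyRange 0 ((n : Int) * lam) := by
  intro n
  induction n with
  | zero => simp [PySem.List.pyRange_one_eq_nil]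
  | succ k ih =>
    have h1 : ((k : Int) + 1) = ((k + 1 : Nat) : Int) := by push_cast; ring
    have hsplit : PySem.List.pyRange 0 (((k + 1 : Nat) : Int)) =
        PySem.List.pyRange 0 (k : Int) ++ [(k : Int)] := by
      rw [← h1]; exact PySem.List.pyRange_one_succ_right (by positivity)
    rw [hsplit, List.flatMap_append, ih]
    simp only [List.flatMap_cons, List.flatMap_nil, List.append_nil]
    rw [← PySem.List.pyRange_one_append 0 ((k : Int) * lam) (((k : Int) + 1) * lam)
      (by positivity) (by nlinarith)]
    rw [h1]

-- the concatenation of the per-subtree blocks of one level is strictly increasing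
lemma merged_pairwise (v lam : Int) :
    ((PySem.List.pyRange 0 v).flatMap
        (fun j => PySem.List.pyRange (j * lam) ((j + 1) * lam))).Pairwise (· < ·) := by
  by_cases hl : 0 < lam
  · by_cases hv : 0 ≤ v
    · rw [show v = ((v.toNat : Nat) : Int) by omega, merge_ranges lam hl]
      exact PySem.List.pairwise_lt_pyRange_one _ _
    · rw [PySem.List.pyRange_one_eq_nil (by omega)]
      simp
  · rw [List.flatMap_eq_nil_iff.mpr (fun j _ => pyRange_mul_nil j (by omega))]
    exact List.Pairwise.nil

lemma flatMap_append_split {α β : Type} (ys : List α) (f g : α → List β) :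
    (ys.flatMap (fun y => f y ++ g y)).Perm (ys.flatMap f ++ ys.flatMap g) := by
  induction ys with
  | nil => simp
  | cons y t ih =>
    simp only [List.flatMap_cons]
    have h1 : ((f y ++ g y) ++ t.flatMap (fun y => f y ++ g y)).Perm
        ((f y ++ g y) ++ (t.flatMap f ++ t.flatMap g)) := ih.append_left _
    refine h1.trans ?_
    rw [List.append_assoc, List.append_assoc]
    apply List.Perm.append_left
    rw [← List.append_assoc, ← List.append_assoc]
    exact List.perm_append_comm.append_right _

lemma flatMap_comm_perm {α β γ : Type} (xs : List α) (ys : List β) (f : α → β → List γ) :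
    (xs.flatMap (fun x => ys.flatMap (f x))).Perm
      (ys.flatMap (fun y => xs.flatMap (fun x => f x y))) := by
  induction xs with
  | nil => simp
  | cons x t ih =>
    simp only [List.flatMap_cons]
    refine ((ih.append_left _).trans ?_)
    exact (flatMap_append_split ys (f x) (fun y => t.flatMap (fun x => f x y))).symm

-- lexicographic order on the 2-element Int lists the ports build
lemma pair_lt_iff (l a l' a' : Int) :
    ([l, a] : List Int) < [l', a'] ↔ l < l' ∨ (l = l' ∧ a < a') := by
  simp [List.cons_lt_cons_iff]

-- sorted with identity key, via the Pairwise characterisation (bridges the two LT instances)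
lemma sorted_id_eq (xs ys : List (List Int)) (hperm : ys.Perm xs)
    (hpair : ys.Pairwise (fun a b : List Int => a < b)) :
    PySem.List.sorted xs (fun x => x) false = ys := by
  have hinst : (fun (a b : List ℤ) => a.decidableLT b) =
      (@LinearOrder.toDecidableLT (List ℤ) List.instLinearOrder) := by
    funext a b
    exact Subsingleton.elim _ _
  have hlem := PySem.List.sorted_eq_of_perm_of_pairwise_lt xs ys (fun a : List ℤ => a) hperm hpair
  refine Eq.trans ?_ hlem
  exact congrArg (fun d => @PySem.List.sorted (List ℤ) (List ℤ) List.instLT d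
    xs (fun a => a) false) hinst

-- A's per-subtree block, rewritten as a flatMap over levels with B's products
lemma pvVjhA_eq (j h : Int) (m w : List Int) :
    pvVjhA j h m w = (PySem.List.pyRange 0 (h + 1)).flatMap (fun lvl =>
      (PySem.List.pyRange
          (j * (pvProdB (PySem.List.slice w (some 1) (some (lvl + 1))) *
                pvProdB (PySem.List.slice m (some (lvl + 1)) (some (h + 1)))))
          ((j + 1) * (pvProdB (PySem.List.slice w (some 1) (some (lvl + 1))) *
                pvProdB (PySem.List.slice m (some (lvl + 1)) (some (h + 1)))))).map
        (fun a => [lvl, a])) := by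
  unfold pvVjhA
  rw [PySem.List.foldl_congr_mem _ _
    (fun acc lvl => acc ++ (PySem.List.pyRange
        (j * (pvProdB (PySem.List.slice w (some 1) (some (lvl + 1))) *
              pvProdB (PySem.List.slice m (some (lvl + 1)) (some (h + 1)))))
        ((j + 1) * (pvProdB (PySem.List.slice w (some 1) (some (lvl + 1))) *
              pvProdB (PySem.List.slice m (some (lvl + 1)) (some (h + 1)))))).map
      (fun a => [lvl, a])) _ ?_]
  · rw [PySem.List.foldl_append_eq_flatMap]; simp
  · intro acc lvl _
    show (PySem.List.pyRange (j * pvLambdaA m w lvl h) ((j + 1) * pvLambdaA m w lvl h)).foldl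
        (fun acc2 a => acc2 ++ [[lvl, a]]) acc = _
    rw [PySem.List.foldl_append_singleton_eq_map]
    simp only [pvLambdaA, prodA_eq_prodB]

-- the strictly increasing shape of B's per-level part
lemma levels_pairwise (g : Int → List Int) (B : Int) (hg : ∀ lvl, (g lvl).Pairwise (· < ·)) :
    ((PySem.List.pyRange 0 B).flatMap
        (fun lvl => (g lvl).map (fun a => [lvl, a]))).Pairwise
      (fun x y : List Int => x < y) := by
  rw [List.pairwise_flatMap]
  constructor
  · intro lvl _
    rw [List.pairwise_map]
    exact (hg lvl).imp (fun h => (pair_lt_iff _ _ _ _).mpr (Or.inr ⟨rfl, h⟩))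
  · refine (PySem.List.pairwise_lt_pyRange_one 0 B).imp ?_
    intro l1 l2 hlt x hx y hy
    simp only [List.mem_map] at hx hy
    obtain ⟨a1, _, rfl⟩ := hx
    obtain ⟨a2, _, rfl⟩ := hy
    exact (pair_lt_iff _ _ _ _).mpr (Or.inl hlt)

-- the core fact: sorting A's j-major pool yields B's level-major emission order
lemma sorted_pool (v hp1 W : Int) (lamf : Int → Int) :
    PySem.List.sorted
        ((PySem.List.pyRange 0 v).flatMap (fun j =>
            (PySem.List.pyRange 0 hp1).flatMap (fun lvl =>
              (PySem.List.pyRange (j * lamf lvl) ((j + 1) * lamf lvl)).map (fun a => [lvl, a])))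
          ++ (PySem.List.pyRange 0 W).map (fun a => [hp1, a]))
        (fun x => x) false
      = (PySem.List.pyRange 0 hp1).flatMap (fun lvl =>
            (PySem.List.pyRange 0 v).flatMap (fun j =>
              (PySem.List.pyRange (j * lamf lvl) ((j + 1) * lamf lvl)).map (fun a => [lvl, a])))
          ++ (PySem.List.pyRange 0 W).map (fun a => [hp1, a]) := by
  have hrw : (PySem.List.pyRange 0 hp1).flatMap (fun lvl =>
        (PySem.List.pyRange 0 v).flatMap (fun j =>
          (PySem.List.pyRange (j * lamf lvl) ((j + 1) * lamf lvl)).map (fun a => [lvl, a])))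
      = (PySem.List.pyRange 0 hp1).flatMap (fun lvl =>
          ((PySem.List.pyRange 0 v).flatMap (fun j =>
            PySem.List.pyRange (j * lamf lvl) ((j + 1) * lamf lvl))).map (fun a => [lvl, a])) := by
    apply List.flatMap_congr
    intro lvl _
    rw [List.map_flatMap]
  have hperm : ((PySem.List.pyRange 0 hp1).flatMap (fun lvl =>
          (PySem.List.pyRange 0 v).flatMap (fun j =>
            (PySem.List.pyRange (j * lamf lvl) ((j + 1) * lamf lvl)).map (fun a => [lvl, a])))
        ++ (PySem.List.pyRange 0 W).map (fun a => [hp1, a])).Perm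
      ((PySem.List.pyRange 0 v).flatMap (fun j =>
          (PySem.List.pyRange 0 hp1).flatMap (fun lvl =>
            (PySem.List.pyRange (j * lamf lvl) ((j + 1) * lamf lvl)).map (fun a => [lvl, a])))
        ++ (PySem.List.pyRange 0 W).map (fun a => [hp1, a])) :=
    List.Perm.append (flatMap_comm_perm _ _ _).symm (List.Perm.refl _)
  have hpair : ((PySem.List.pyRange 0 hp1).flatMap (fun lvl =>
          (PySem.List.pyRange 0 v).flatMap (fun j =>
            (PySem.List.pyRange (j * lamf lvl) ((j + 1) * lamf lvl)).map (fun a => [lvl, a])))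
        ++ (PySem.List.pyRange 0 W).map (fun a => [hp1, a])).Pairwise
      (fun x y : List Int => x < y) := by
    rw [List.pairwise_append]
    refine ⟨?_, ?_, ?_⟩
    · rw [hrw]
      exact levels_pairwise _ hp1 (fun lvl => merged_pairwise v (lamf lvl))
    · rw [List.pairwise_map]
      exact (PySem.List.pairwise_lt_pyRange_one 0 _).imp
        (fun h => (pair_lt_iff _ _ _ _).mpr (Or.inr ⟨rfl, h⟩))
    · intro x hx y hy
      simp only [List.mem_flatMap, List.mem_map] at hx hy
      obtain ⟨lvl, hlvl, j, _, a1, _, rfl⟩ := hx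
      obtain ⟨a2, _, rfl⟩ := hy
      exact (pair_lt_iff _ _ _ _).mpr (Or.inl (PySem.List.mem_pyRange_one.mp hlvl).2)
  exact sorted_id_eq _ _ hperm hpair

-- ===== VERDICT (by name: the statement is the Claim_ definition above) =====
theorem get_Vh_py_spec : Claim_equal_get_Vh_py := by
  intro hp1 m w _ hpre
  unfold Spec_get_Vh_py get_Vh_py get_Vh_py_alt
  by_cases h0 : hp1 = 0
  · simp [h0]
  · simp only [if_neg h0]
    rcases hpre with rfl | hin
    · exact absurd rfl h0
    obtain ⟨v, hv⟩ := Option.ne_none_iff_exists'.mp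
      (fun hn => (PySem.List.pyGet?_eq_none_iff m hp1).mp hn hin)
    rw [hv]
    dsimp only
    simp only [PySem.List.foldl_append_singleton_eq_map, PySem.List.foldl_append_eq_flatMap,
      List.nil_append, prodA_eq_prodB, pvVjhA_eq, sub_add_cancel]
    exact sorted_pool v hp1 (pvProdB (PySem.List.slice w (some 1) (some (hp1 + 1))))
      (fun lvl => pvProdB (PySem.List.slice w (some 1) (some (lvl + 1))) *
        pvProdB (PySem.List.slice m (some (lvl + 1)) (some hp1)))
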